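-- pv_equiv track=rewrite | github.com/buobo/scope_match | scope_match_9.2.py | _strip_leading_ws_from_segments
-- ===== SOURCE A (Python) =====
-- def _append_segment(segments, text, tag_name):
--     if text == "":
--         return
--     if segments and segments[-1]["tag"] == tag_name:
--         segments[-1]["text"] += text
--     else:
--         segments.append({"text": text, "tag": tag_name})
--
-- def _strip_leading_ws_from_segments(segments):
--     result = []
--     stripping = True
--
--     for seg in segments or []:
--         text = str(seg.get("text", ""))
--         tag = seg.get("tag")
--
--         if stripping:
--             stripped = text.lstrip(" \t")
--             if stripped == "":
--                 continue
--             text = stripped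
--             stripping = False
--
--         if text:
--             _append_segment(result, text, tag)
--
--     return result
-- ===== SOURCE B (Python) =====
-- def _strip_leading_ws_from_segments(segments):
--     # Pass 1: flatten to (text, tag) pairs, dropping leading space/tab text.
--     pairs = []
--     stripping = True
--     for seg in segments or []:
--         text = str(seg.get("text", ""))
--         if stripping:
--             text = text.lstrip(" \t")
--             if text == "":
--                 continue
--             stripping = False
--         if text:
--             pairs.append((text, seg.get("tag")))
--     # Pass 2: merge each maximal run of consecutive same-tag pairs.
--     return _merge_runs(pairs)
--
--
-- def _merge_runs(pairs):
--     if not pairs: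
--         return []
--     text, tag = pairs[0]
--     rest = pairs[1:]
--     i = 0
--     while i < len(rest) and rest[i][1] == tag:
--         text += rest[i][0]
--         i += 1
--     return [{"text": text, "tag": tag}] + _merge_runs(rest[i:])
-- ===== Notes on version B (the rewrite author's own statement) =====
-- stated objective: alternative
-- what changed: A strips and merges in one interleaved loop that mutates the last output dict via _append_segment; B first flattens the segments into a list of stripped (text, tag) pairs, then merges each maximal run of consecutive same-tag pairs into one dict in a second pass.
import Mathlib
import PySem

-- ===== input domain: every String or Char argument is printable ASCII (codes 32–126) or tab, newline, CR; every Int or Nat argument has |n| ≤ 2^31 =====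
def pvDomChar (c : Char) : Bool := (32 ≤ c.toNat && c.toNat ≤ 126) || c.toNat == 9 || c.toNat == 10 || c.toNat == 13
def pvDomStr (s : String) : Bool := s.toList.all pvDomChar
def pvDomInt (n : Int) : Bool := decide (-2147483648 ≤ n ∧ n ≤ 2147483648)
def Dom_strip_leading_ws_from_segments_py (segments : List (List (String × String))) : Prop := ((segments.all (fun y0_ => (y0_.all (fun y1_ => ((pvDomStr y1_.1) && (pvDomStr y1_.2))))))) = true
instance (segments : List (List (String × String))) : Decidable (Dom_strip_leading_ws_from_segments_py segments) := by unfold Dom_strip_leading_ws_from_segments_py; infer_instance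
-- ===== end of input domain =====

-- B replaces A's interleaved strip-and-merge loop (mutating the last output dict) by two passes:
-- collect stripped (text, tag) pairs, then merge maximal runs of equal tags; objective: alternative
-- decomposition, same cost.

-- ===== shared primitive ports =====
-- exact port of `d.get(k, dflt)` on an association list (first match wins, as Python dict lookup)
def pvGetStr (d : List (String × String)) (k dflt : String) : String :=
  match d.find? (fun p => p.1 == k) with
  | some p => p.2
  | none => dflt

-- hand port of `s.lstrip(" \t")`: drop leading chars from the set {' ', '\t'}; exact on all strings
def pvLstripST (s : String) : String :=
  String.ofList (s.toList.dropWhile (fun c => c == ' ' || c == '\t'))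

-- hand port of Python `str + str` via the char lists (exact)
def pvStrAdd (a b : String) : String := String.ofList (a.toList ++ b.toList)

-- exact port of `d[k] = v` on an association list: replace first match in place, else append
def pvDictSet : List (String × String) → String → String → List (String × String)
  | [], k, v => [(k, v)]
  | p :: rest, k, v => if p.1 == k then (k, v) :: rest else p :: pvDictSet rest k v

-- ===== PORT A =====
-- port of _append_segment; `segments[-1]["tag"]` / `["text"]` are read with pvGetStr (default ""):
-- every dict in `segments` is built by this function and always carries both keys, so the default
-- branch is unreachable and the port is exact.
def pvAppendSegment (segments : List (List (String × String))) (text : String)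
    (tag_name : String) : List (List (String × String)) :=
  if text == "" then segments
  else
    match segments.getLast? with
    | some last =>
        if pvGetStr last "tag" "" == tag_name then
          segments.dropLast ++ [pvDictSet last "text" (pvStrAdd (pvGetStr last "text" "") text)]
        else segments ++ [[("text", text), ("tag", tag_name)]]
    | none => segments ++ [[("text", text), ("tag", tag_name)]]

-- port of A: one fold over the segments with state (result, stripping); `seg.get("tag")` is ported
-- as pvGetStr seg "tag" "" — exact under Pre_ (the key is present whenever the value is used)
def strip_leading_ws_from_segments_py (segments : List (List (String × String))) :
    List (List (String × String)) :=
  (segments.foldl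
    (fun (st : List (List (String × String)) × Bool) seg =>
      let text := pvGetStr seg "text" ""
      let tag := pvGetStr seg "tag" ""
      if st.2 then
        let stripped := pvLstripST text
        if stripped == "" then st
        else (pvAppendSegment st.1 stripped tag, false)  -- stripped ≠ "", so `if text:` holds
      else
        if text == "" then st
        else (pvAppendSegment st.1 text tag, false))
    ([], true)).1

-- ===== PORT B =====
-- port of _merge_runs: the while loop over the leading same-tag run becomes takeWhile + a fold;
-- the recursion on the shrinking pair list is made structural with a fuel argument fixed to the
-- list length (each step consumes at least one pair, so the fuel never runs out: exact)
def pvMergeRunsGo : Nat → List (String × String) → List (List (String × String))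
  | _, [] => []
  | 0, _ :: _ => []
  | fuel + 1, (text, tag) :: rest =>
      [("text", (rest.takeWhile (fun p => p.2 == tag)).foldl (fun a p => pvStrAdd a p.1) text),
       ("tag", tag)] ::
        pvMergeRunsGo fuel (rest.drop (rest.takeWhile (fun p => p.2 == tag)).length)

def pvMergeRuns (pairs : List (String × String)) : List (List (String × String)) :=
  pvMergeRunsGo pairs.length pairs

-- port of B: pass 1 collects the stripped (text, tag) pairs, pass 2 merges runs
def strip_leading_ws_from_segments_py_alt (segments : List (List (String × String))) :
    List (List (String × String)) :=
  pvMergeRuns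
    ((segments.foldl
      (fun (st : List (String × String) × Bool) seg =>
        let text := pvGetStr seg "text" ""
        if st.2 then
          let t := pvLstripST text
          if t == "" then st
          else (st.1 ++ [(t, pvGetStr seg "tag" "")], false)
        else
          if text == "" then st
          else (st.1 ++ [(text, pvGetStr seg "tag" "")], false))
      ([], true)).1)

-- ===== PRECONDITION & SPEC =====
def pvSegText (seg : List (String × String)) : String := pvGetStr seg "text" ""
def pvSegBlank (seg : List (String × String)) : Bool := pvLstripST (pvSegText seg) == ""

-- Pre_ excludes inputs where a segment whose text survives into the output has no "tag" key:
-- there Python's result carries tag None, which is not a value of the declared str type.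
def Pre_strip_leading_ws_from_segments_py (segments : List (List (String × String))) : Prop :=
  ∀ i (h : i < segments.length),
    (segments[i].any (fun p => p.1 == "tag")) = true ∨
      (if ((segments.take i).all pvSegBlank) = true
       then pvSegBlank segments[i] = true
       else pvSegText segments[i] = "")
instance (segments : List (List (String × String))) : Decidable (Pre_strip_leading_ws_from_segments_py segments) := by unfold Pre_strip_leading_ws_from_segments_py; infer_instance

def pvWitness_strip_leading_ws_from_segments_py : (List (List (String × String))) :=
  [[("text", " \tx"), ("tag", "b")], [("text", "y"), ("tag", "b")], [("text", "z"), ("tag", "i")]]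

def Spec_strip_leading_ws_from_segments_py (segments : List (List (String × String))) (out : List (List (String × String))) : Prop := out = strip_leading_ws_from_segments_py_alt segments
instance (segments : List (List (String × String))) (out : List (List (String × String))) : Decidable (Spec_strip_leading_ws_from_segments_py segments out) := by unfold Spec_strip_leading_ws_from_segments_py; infer_instance

-- ===== CLAIM (what is proved, stated in full; the proofs are below) =====
def Claim_equal_strip_leading_ws_from_segments_py : Prop := ∀ (segments : List (List (String × String))), Dom_strip_leading_ws_from_segments_py segments → Pre_strip_leading_ws_from_segments_py segments → Spec_strip_leading_ws_from_segments_py segments (strip_leading_ws_from_segments_py segments)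

-- ===== LEMMAS AND PROOFS =====

-- the (text, tag) pairs both loops process, as a pure recursion on the segment list
def pvPairsOf : List (List (String × String)) → Bool → List (String × String)
  | [], _ => []
  | seg :: rest, true =>
      let t := pvLstripST (pvGetStr seg "text" "")
      if t == "" then pvPairsOf rest true
      else (t, pvGetStr seg "tag" "") :: pvPairsOf rest false
  | seg :: rest, false =>
      let t := pvGetStr seg "text" ""
      if t == "" then pvPairsOf rest false
      else (t, pvGetStr seg "tag" "") :: pvPairsOf rest false

def pvMkSeg (t g : String) : List (String × String) := [("text", t), ("tag", g)]

-- the two loop bodies, named (definitionally equal to the lambdas inside the ports)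
def pvStepA (st : List (List (String × String)) × Bool) (seg : List (String × String)) :
    List (List (String × String)) × Bool :=
  let text := pvGetStr seg "text" ""
  let tag := pvGetStr seg "tag" ""
  if st.2 then
    let stripped := pvLstripST text
    if stripped == "" then st
    else (pvAppendSegment st.1 stripped tag, false)
  else
    if text == "" then st
    else (pvAppendSegment st.1 text tag, false)

def pvStepB (st : List (String × String) × Bool) (seg : List (String × String)) :
    List (String × String) × Bool :=
  let text := pvGetStr seg "text" ""
  if st.2 then
    let t := pvLstripST text
    if t == "" then st
    else (st.1 ++ [(t, pvGetStr seg "tag" "")], false)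
  else
    if text == "" then st
    else (st.1 ++ [(text, pvGetStr seg "tag" "")], false)

lemma pvA_eq (segs : List (List (String × String))) :
    strip_leading_ws_from_segments_py segs = (segs.foldl pvStepA ([], true)).1 := rfl

lemma pvB_eq (segs : List (List (String × String))) :
    strip_leading_ws_from_segments_py_alt segs = pvMergeRuns ((segs.foldl pvStepB ([], true)).1) :=
  rfl

lemma pvPairsOf_nonempty :
    ∀ (segs : List (List (String × String))) (b : Bool) (p : String × String),
      p ∈ pvPairsOf segs b → p.1 ≠ "" := by
  intro segs
  induction segs with
  | nil => intro b p hp; simp [pvPairsOf] at hp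
  | cons s r ih =>
      intro b p hp
      cases b with
      | true =>
          simp only [pvPairsOf] at hp
          split_ifs at hp with h
          · exact ih true p hp
          · rcases List.mem_cons.mp hp with rfl | hp'
            · simpa using h
            · exact ih false p hp'
      | false =>
          simp only [pvPairsOf] at hp
          split_ifs at hp with h
          · exact ih false p hp
          · rcases List.mem_cons.mp hp with rfl | hp'
            · simpa using h
            · exact ih false p hp'

lemma pvB_pass1 :
    ∀ (segs : List (List (String × String))) (ps : List (String × String)) (b : Bool),
      (segs.foldl pvStepB (ps, b)).1 = ps ++ pvPairsOf segs b := by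
  intro segs
  induction segs with
  | nil => intro ps b; simp [pvPairsOf]
  | cons s r ih =>
      intro ps b
      rw [List.foldl_cons]
      cases b with
      | true =>
          by_cases h : (pvLstripST (pvGetStr s "text" "") == "") = true
          · have hs : pvStepB (ps, true) s = (ps, true) := by simp [pvStepB, h]
            rw [hs, ih ps true]
            simp [pvPairsOf, h]
          · have hs : pvStepB (ps, true) s =
                (ps ++ [(pvLstripST (pvGetStr s "text" ""), pvGetStr s "tag" "")], false) := by
              simp [pvStepB, h]
            rw [hs, ih _ false]
            simp [pvPairsOf, h]
      | false =>
          by_cases h : (pvGetStr s "text" "" == "") = true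
          · have hs : pvStepB (ps, false) s = (ps, false) := by simp [pvStepB, h]
            rw [hs, ih ps false]
            simp [pvPairsOf, h]
          · have hs : pvStepB (ps, false) s =
                (ps ++ [(pvGetStr s "text" "", pvGetStr s "tag" "")], false) := by
              simp [pvStepB, h]
            rw [hs, ih _ false]
            simp [pvPairsOf, h]

lemma pvA_loop :
    ∀ (segs : List (List (String × String))) (res : List (List (String × String))) (b : Bool),
      (segs.foldl pvStepA (res, b)).1
        = (pvPairsOf segs b).foldl (fun r p => pvAppendSegment r p.1 p.2) res := by
  intro segs
  induction segs with
  | nil => intro res b; simp [pvPairsOf]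
  | cons s r ih =>
      intro res b
      rw [List.foldl_cons]
      cases b with
      | true =>
          by_cases h : (pvLstripST (pvGetStr s "text" "") == "") = true
          · have hs : pvStepA (res, true) s = (res, true) := by simp [pvStepA, h]
            rw [hs, ih res true]
            simp [pvPairsOf, h]
          · have hs : pvStepA (res, true) s =
                (pvAppendSegment res (pvLstripST (pvGetStr s "text" "")) (pvGetStr s "tag" ""),
                  false) := by
              simp [pvStepA, h]
            rw [hs, ih _ false]
            simp [pvPairsOf, h]
      | false =>
          by_cases h : (pvGetStr s "text" "" == "") = true
          · have hs : pvStepA (res, false) s = (res, false) := by simp [pvStepA, h]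
            rw [hs, ih res false]
            simp [pvPairsOf, h]
          · have hs : pvStepA (res, false) s =
                (pvAppendSegment res (pvGetStr s "text" "") (pvGetStr s "tag" ""), false) := by
              simp [pvStepA, h]
            rw [hs, ih _ false]
            simp [pvPairsOf, h]

lemma pvAppendSegment_concat (acc : List (List (String × String))) (t g t' g' : String)
    (h : t' ≠ "") :
    pvAppendSegment (acc ++ [pvMkSeg t g]) t' g' =
      if g == g' then acc ++ [pvMkSeg (pvStrAdd t t') g]
      else acc ++ [pvMkSeg t g, pvMkSeg t' g'] := by
  have ht' : (t' == "") = false := by simpa using h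
  simp only [pvAppendSegment, ht', Bool.false_eq_true, if_false, List.getLast?_concat,
    List.dropLast_concat]
  simp [pvGetStr, pvDictSet, pvMkSeg, List.find?]

-- A's merge, written as the run accumulator it maintains
def pvGroupAcc (t g : String) : List (String × String) → List (List (String × String))
  | [] => [pvMkSeg t g]
  | (t', g') :: rest =>
      if g == g' then pvGroupAcc (pvStrAdd t t') g rest
      else pvMkSeg t g :: pvGroupAcc t' g' rest

lemma pvFoldl_append_eq_groupAcc :
    ∀ (ps : List (String × String)) (acc : List (List (String × String))) (t g : String),
      (∀ p ∈ ps, p.1 ≠ "") →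
      ps.foldl (fun r p => pvAppendSegment r p.1 p.2) (acc ++ [pvMkSeg t g]) =
        acc ++ pvGroupAcc t g ps := by
  intro ps
  induction ps with
  | nil => intro acc t g _; simp [pvGroupAcc]
  | cons p rest ih =>
      intro acc t g hne
      obtain ⟨t', g'⟩ := p
      have ht' : t' ≠ "" := hne (t', g') (List.mem_cons_self ..)
      simp only [List.foldl_cons]
      rw [pvAppendSegment_concat acc t g t' g' ht']
      by_cases hg : (g == g') = true
      · rw [if_pos hg]
        rw [ih acc (pvStrAdd t t') g (fun q hq => hne q (List.mem_cons_of_mem _ hq))]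
        simp [pvGroupAcc, hg]
      · rw [if_neg hg]
        have hsplit : acc ++ [pvMkSeg t g, pvMkSeg t' g'] =
            (acc ++ [pvMkSeg t g]) ++ [pvMkSeg t' g'] := by simp
        rw [hsplit, ih (acc ++ [pvMkSeg t g]) t' g' (fun q hq => hne q (List.mem_cons_of_mem _ hq))]
        simp [pvGroupAcc, hg]

lemma pvMergeRunsGo_congr :
    ∀ (n m : Nat) (l : List (String × String)), l.length ≤ n → l.length ≤ m →
      pvMergeRunsGo n l = pvMergeRunsGo m l := by
  intro n
  induction n with
  | zero =>
      intro m l hn _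
      have : l = [] := List.length_eq_zero_iff.mp (Nat.le_zero.mp hn)
      subst this
      cases m <;> rfl
  | succ n ih =>
      intro m l hn hm
      cases l with
      | nil => cases m <;> rfl
      | cons p rest =>
          obtain ⟨t, g⟩ := p
          cases m with
          | zero => simp at hm
          | succ m =>
              simp only [pvMergeRunsGo]
              refine congrArg _ (ih m _ ?_ ?_)
              · have h1 : (rest.takeWhile (fun p => p.2 == g)).length ≤ rest.length :=
                  (List.takeWhile_sublist _).length_le
                simp only [List.length_drop]
                simp only [List.length_cons] at hn
                omega
              · have h1 : (rest.takeWhile (fun p => p.2 == g)).length ≤ rest.length :=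
                  (List.takeWhile_sublist _).length_le
                simp only [List.length_drop]
                simp only [List.length_cons] at hm
                omega

lemma pvMergeRuns_cons (t g : String) (rest : List (String × String)) :
    pvMergeRuns ((t, g) :: rest) =
      [("text", (rest.takeWhile (fun p => p.2 == g)).foldl (fun a p => pvStrAdd a p.1) t),
       ("tag", g)] ::
        pvMergeRuns (rest.drop (rest.takeWhile (fun p => p.2 == g)).length) := by
  unfold pvMergeRuns
  simp only [List.length_cons, pvMergeRunsGo]
  refine congrArg _ (pvMergeRunsGo_congr rest.length _ _ ?_ ?_)
  · simp only [List.length_drop]; omega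
  · exact le_refl _

lemma pvMergeRuns_cons_same (t g t' : String) (rest : List (String × String)) :
    pvMergeRuns ((t, g) :: (t', g) :: rest) = pvMergeRuns ((pvStrAdd t t', g) :: rest) := by
  rw [pvMergeRuns_cons, pvMergeRuns_cons]
  simp

lemma pvMergeRuns_cons_diff (t g t' g' : String) (rest : List (String × String))
    (h : (g == g') = false) :
    pvMergeRuns ((t, g) :: (t', g') :: rest) = pvMkSeg t g :: pvMergeRuns ((t', g') :: rest) := by
  have h' : (g' == g) = false := by
    simp only [beq_eq_false_iff_ne] at h ⊢
    exact fun e => h e.symm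
  rw [pvMergeRuns_cons]
  simp [h', pvMkSeg]

lemma pvGroupAcc_eq_mergeRuns :
    ∀ (ps : List (String × String)) (t g : String),
      pvGroupAcc t g ps = pvMergeRuns ((t, g) :: ps) := by
  intro ps
  induction ps with
  | nil => intro t g; simp [pvGroupAcc, pvMergeRuns, pvMergeRunsGo, pvMkSeg]
  | cons p rest ih =>
      intro t g
      obtain ⟨t', g'⟩ := p
      simp only [pvGroupAcc]
      by_cases hg : (g == g') = true
      · rw [if_pos hg]
        obtain rfl := eq_of_beq hg
        rw [ih, ← pvMergeRuns_cons_same]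
      · rw [if_neg hg]
        rw [ih t' g']
        rw [pvMergeRuns_cons_diff t g t' g' rest (by simpa using hg)]

-- ===== VERDICT (by name: the statement is the Claim_ definition above) =====
theorem strip_leading_ws_from_segments_py_spec : Claim_equal_strip_leading_ws_from_segments_py := by
  intro segs _ _
  unfold Spec_strip_leading_ws_from_segments_py
  rw [pvA_eq, pvB_eq, pvA_loop, pvB_pass1]
  simp only [List.nil_append]
  cases hps : pvPairsOf segs true with
  | nil => rfl
  | cons p rest =>
      obtain ⟨t, g⟩ := p
      have hne : ∀ q ∈ pvPairsOf segs true, q.1 ≠ "" := fun q hq => pvPairsOf_nonempty segs true q hq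
      rw [hps] at hne
      have ht : t ≠ "" := hne (t, g) (by simp)
      have h1 : pvAppendSegment [] t g = [pvMkSeg t g] := by
        simp [pvAppendSegment, pvMkSeg, ht]
      calc ((t, g) :: rest).foldl (fun r p => pvAppendSegment r p.1 p.2) [] =
            rest.foldl (fun r p => pvAppendSegment r p.1 p.2) ([] ++ [pvMkSeg t g]) := by
              simp [List.foldl_cons, h1]
        _ = [] ++ pvGroupAcc t g rest := by
              exact pvFoldl_append_eq_groupAcc rest [] t g (fun q hq => hne q (by simp [hq]))
        _ = pvMergeRuns ((t, g) :: rest) := by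
              simp [pvGroupAcc_eq_mergeRuns]
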